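-- pv_equiv track=rewrite | github.com/AyushSingh1003/internal-website-intel | backend/app/services/ultimate_scraper.py | _is_valid_link
-- ===== SOURCE A (Python) =====
-- def _is_valid_link(url: str) -> bool:
--     """Check if link is worth scraping"""
--     # Skip certain file types
--     skip_extensions = [
--         '.pdf', '.jpg', '.jpeg', '.png', '.gif', '.svg', '.ico',
--         '.css', '.js', '.xml', '.zip', '.doc', '.docx', '.xls',
--         '.xlsx', '.ppt', '.pptx', '.mp4', '.mp3', '.avi', '.mov'
--     ]
--
--     url_lower = url.lower()
--     return not any(url_lower.endswith(ext) for ext in skip_extensions)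
-- ===== SOURCE B (Python) =====
-- _SKIP_NAMES = {
--     'pdf', 'jpg', 'jpeg', 'png', 'gif', 'svg', 'ico',
--     'css', 'js', 'xml', 'zip', 'doc', 'docx', 'xls',
--     'xlsx', 'ppt', 'pptx', 'mp4', 'mp3', 'avi', 'mov'
-- }
--
-- def _is_valid_link(url: str) -> bool:
--     """Check if link is worth scraping"""
--     _, sep, tail = url.lower().rpartition('.')
--     return not (sep == '.' and tail in _SKIP_NAMES)
-- ===== Notes on version B (the rewrite author's own statement) =====
-- stated objective: idiomatic
-- what changed: B extracts the token after the URL's last dot once with rpartition and does a single set-membership test, instead of A's scan of 21 endswith checks.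
import Mathlib
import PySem

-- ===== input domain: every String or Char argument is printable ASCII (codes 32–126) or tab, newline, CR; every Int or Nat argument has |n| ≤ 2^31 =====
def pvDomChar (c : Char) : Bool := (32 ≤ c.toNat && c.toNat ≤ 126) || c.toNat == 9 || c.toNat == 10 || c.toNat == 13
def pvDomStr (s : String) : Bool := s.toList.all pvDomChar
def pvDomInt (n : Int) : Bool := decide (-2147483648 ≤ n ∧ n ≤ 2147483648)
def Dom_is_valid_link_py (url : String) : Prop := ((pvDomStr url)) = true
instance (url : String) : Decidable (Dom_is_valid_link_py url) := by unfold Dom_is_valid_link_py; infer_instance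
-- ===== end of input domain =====

-- B replaces A's 21-fold endswith scan by one rpartition('.') extraction plus a single
-- membership test in a constant set of extension names (idiomatic; same return values).

-- ===== PORT A =====
def is_valid_link_py (url : String) : Bool :=
  let skip_extensions : List String :=
    [".pdf", ".jpg", ".jpeg", ".png", ".gif", ".svg", ".ico",
     ".css", ".js", ".xml", ".zip", ".doc", ".docx", ".xls",
     ".xlsx", ".ppt", ".pptx", ".mp4", ".mp3", ".avi", ".mov"]
  let url_lower := PySem.Str.lower url
  !(skip_extensions.any (fun ext => PySem.Str.endswith url_lower ext))

-- ===== PORT B =====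
-- the 21 names of Source B's _SKIP_NAMES set (no leading dots), as char lists
def pvSkipNames : List (List Char) :=
  ["pdf", "jpg", "jpeg", "png", "gif", "svg", "ico",
   "css", "js", "xml", "zip", "doc", "docx", "xls",
   "xlsx", "ppt", "pptx", "mp4", "mp3", "avi", "mov"].map String.toList

-- hand port of s.rpartition('.') restricted to what Source B uses: the tail after the LAST
-- '.' (some tail) or none when '.' does not occur ('' separator); exact for a 1-char sep
def pvRPartitionDotTail : List Char → Option (List Char)
  | [] => none
  | c :: rest =>
    match pvRPartitionDotTail rest with
    | some t => some t
    | none => if c = '.' then some rest else none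

def is_valid_link_py_alt (url : String) : Bool :=
  match pvRPartitionDotTail (PySem.Str.lower url).toList with
  | none => true                                   -- sep == '' : no dot
  | some tail => !(pvSkipNames.contains tail)      -- not (tail in _SKIP_NAMES)

-- ===== PRECONDITION & SPEC =====
def Spec_is_valid_link_py (url : String) (out : Bool) : Prop := out = is_valid_link_py_alt url
instance (url : String) (out : Bool) : Decidable (Spec_is_valid_link_py url out) := by unfold Spec_is_valid_link_py; infer_instance

-- ===== CLAIM (what is proved, stated in full; the proofs are below) =====
def Claim_equal_is_valid_link_py : Prop := ∀ (url : String), Dom_is_valid_link_py url → Spec_is_valid_link_py url (is_valid_link_py url)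

-- ===== LEMMAS AND PROOFS =====

theorem rpdt_suffix (cs t : List Char) (h : pvRPartitionDotTail cs = some t) :
    ('.' :: t) <:+ cs := by
  induction cs with
  | nil => simp [pvRPartitionDotTail] at h
  | cons c rest ih =>
    simp only [pvRPartitionDotTail] at h
    cases hr : pvRPartitionDotTail rest with
    | some t' =>
      rw [hr] at h
      exact (ih (hr.trans (by simpa [hr] using h))).trans (List.suffix_cons c rest)
    | none =>
      rw [hr] at h
      by_cases hc : c = '.'
      · simp [hc] at h
        subst hc; subst h; exact List.suffix_refl _
      · simp [hc] at h

theorem rpdt_none (cs : List Char) (h : '.' ∉ cs) : pvRPartitionDotTail cs = none := by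
  induction cs with
  | nil => rfl
  | cons c rest ih =>
    simp only [List.mem_cons, not_or] at h
    simp [pvRPartitionDotTail, ih h.2, Ne.symm h.1]

theorem suffix_rpdt (cs t : List Char) (ht : '.' ∉ t) (h : ('.' :: t) <:+ cs) :
    pvRPartitionDotTail cs = some t := by
  induction cs with
  | nil => simp at h
  | cons c rest ih =>
    rcases List.suffix_cons_iff.mp h with heq | hsuf
    · cases heq
      simp [pvRPartitionDotTail, rpdt_none t ht]
    · simp [pvRPartitionDotTail, ih hsuf]

-- the two constant lists correspond: A's extensions are '.' :: name for each name of B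
theorem skipNames_dotfree : ∀ n ∈ pvSkipNames, '.' ∉ n := by decide

theorem exts_map :
    ([".pdf", ".jpg", ".jpeg", ".png", ".gif", ".svg", ".ico",
      ".css", ".js", ".xml", ".zip", ".doc", ".docx", ".xls",
      ".xlsx", ".ppt", ".pptx", ".mp4", ".mp3", ".avi", ".mov"] : List String).map String.toList
    = pvSkipNames.map (fun n => '.' :: n) := by decide

theorem core (low : List Char) :
    ((pvSkipNames.map (fun n => '.' :: n)).any (fun e => PySem.Chars.endswith low e))
    = (match pvRPartitionDotTail low with
       | none => false
       | some t => pvSkipNames.contains t) := by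
  cases hr : pvRPartitionDotTail low with
  | none =>
    simp only [List.any_eq_false, List.mem_map]
    rintro e ⟨n, hn, rfl⟩
    rw [Bool.not_eq_true, ← Bool.not_eq_true, PySem.Chars.endswith_iff]
    intro hsuf
    simp [suffix_rpdt low n (skipNames_dotfree n hn) hsuf] at hr
  | some t =>
    simp only
    cases hc : pvSkipNames.contains t with
    | true =>
      simp only [List.any_eq_true, List.mem_map]
      refine ⟨'.' :: t, ⟨t, List.contains_iff_mem.mp hc, rfl⟩, ?_⟩
      rw [PySem.Chars.endswith_iff]
      exact rpdt_suffix low t hr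
    | false =>
      simp only [List.any_eq_false, List.mem_map]
      rintro e ⟨n, hn, rfl⟩
      rw [Bool.not_eq_true, ← Bool.not_eq_true, PySem.Chars.endswith_iff]
      intro hsuf
      have heq := (suffix_rpdt low n (skipNames_dotfree n hn) hsuf).symm.trans hr
      rw [Option.some_inj] at heq
      subst heq
      have hct : pvSkipNames.contains n = true := List.contains_iff_mem.mpr hn
      rw [hc] at hct
      exact Bool.noConfusion hct

-- ===== VERDICT (by name: the statement is the Claim_ definition above) =====
theorem is_valid_link_py_spec : Claim_equal_is_valid_link_py := by
  intro url _
  unfold Spec_is_valid_link_py is_valid_link_py is_valid_link_py_alt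
  simp only [PySem.Str.endswith_eq]
  have h : (fun ext : String => PySem.Chars.endswith (PySem.Str.lower url).toList ext.toList)
      = (fun e : List Char => PySem.Chars.endswith (PySem.Str.lower url).toList e) ∘ String.toList := rfl
  rw [h, ← List.any_map, exts_map, core]
  cases pvRPartitionDotTail (PySem.Str.lower url).toList <;> simp
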